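-- pv_equiv track=rewrite | github.com/shixun22/Lefschetz_thimble | PL_functions.py | get_non_repetitive_groups
-- ===== SOURCE A (Python) =====
-- def if_separate_lists(list_of_lists, except_nums=[-1]):
--     """
--     if all l in list_of_lists have no shared elements except for those in except_nums
--     """
--     flattened_list = [i for l in list_of_lists for i in l]
--     shared = set([x for x in flattened_list if flattened_list.count(x) > 1])
--     real_shared = [x for x in shared if x not in except_nums]
--     res = 1 if len(real_shared)==0 else 0
--     return res
--
-- def get_non_repetitive_groups(lists, except_nums=[-1]):
--     """
--     get groups of lists without repetitive elements (except elements in except_nums)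
--     letting them include as many elements as possible
--     """
--     n_list = len(lists)
--     groups = [[l] for l in lists] # add groups of 1 lists
--     for nlist_in_group in range(1,n_list): # add groups with more number of lists
--         groups_w_nlist = [group for group in groups if len(group)==nlist_in_group]
--         for i in range(len(groups_w_nlist)):
--             for j in range(n_list):
--                 new_group = groups_w_nlist[i] + [lists[j]]
--                 if if_separate_lists(new_group, except_nums=except_nums)==1:
--                     groups.append(new_group)
--     return groups
-- ===== SOURCE B (Python) =====
-- def get_non_repetitive_groups(lists, except_nums=[-1]):
--     """
--     get groups of lists without repetitive elements (except elements in except_nums)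
--     letting them include as many elements as possible
--     """
--     n = len(lists)
--     filt = [[x for x in l if x not in except_nums] for l in lists]
--     ok = [len(set(f)) == len(f) for f in filt]             # list usable at all?
--     comp = [[set(filt[i]).isdisjoint(filt[j]) for j in range(n)] for i in range(n)]
--     groups = [[l] for l in lists]
--     frontier = [[i] for i in range(n) if ok[i]]            # index tuples; non-ok singles never extend
--     for _ in range(1, n):
--         nxt = [g + [j] for g in frontier for j in range(n)
--                if ok[j] and all(comp[i][j] for i in g)]
--         groups += [[lists[i] for i in g] for g in nxt]
--         frontier = nxt
--     return groups
-- ===== Notes on version B (the rewrite author's own statement) =====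
-- stated objective: faster
-- what changed: B replaces A's per-candidate flatten-and-count separateness test (and A's per-round rescan of the whole growing result list by length) with a one-time n×n pairwise-disjointness matrix over the except-filtered lists plus a per-list validity flag, and grows an explicit frontier of index tuples checked against that matrix.
import Mathlib
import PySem

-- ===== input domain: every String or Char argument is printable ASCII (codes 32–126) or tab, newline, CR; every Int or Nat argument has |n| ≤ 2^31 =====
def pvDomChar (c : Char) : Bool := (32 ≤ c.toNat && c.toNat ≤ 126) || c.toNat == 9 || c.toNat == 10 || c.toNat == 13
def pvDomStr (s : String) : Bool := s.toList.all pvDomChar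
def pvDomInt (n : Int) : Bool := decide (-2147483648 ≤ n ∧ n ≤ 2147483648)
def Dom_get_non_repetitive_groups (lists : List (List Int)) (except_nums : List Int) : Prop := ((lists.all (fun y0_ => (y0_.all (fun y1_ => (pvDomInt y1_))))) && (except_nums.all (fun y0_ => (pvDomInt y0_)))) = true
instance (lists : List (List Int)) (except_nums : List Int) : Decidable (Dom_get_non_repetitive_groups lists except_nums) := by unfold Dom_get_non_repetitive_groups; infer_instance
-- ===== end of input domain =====

-- B reduces the separateness test of a candidate group to PAIRWISE disjointness of the
-- except-filtered lists, precomputed once as an n×n boolean matrix, and grows a frontier of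
-- INDEX tuples checked against that matrix instead of flattening and counting every candidate
-- group and rescanning the whole result list each round (objective: faster).

-- ===== PORT A =====
def if_separate_lists (list_of_lists : List (List Int)) (except_nums : List Int) : Int :=
  let flattened := list_of_lists.flatMap (fun l => l)
  let shared := PySem.Set.ofList (flattened.filter (fun x => decide (1 < flattened.count x)))
  -- Python iterates over the set 'shared' to build real_shared; only its LENGTH is used,
  -- so porting through the Set's list order is exact here.
  let real_shared := shared.filter (fun x => !except_nums.contains x)
  if real_shared.length = 0 then 1 else 0

def get_non_repetitive_groups (lists : List (List Int)) (except_nums : List Int) : List (List (List Int)) :=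
  let groups := lists.map (fun l => [l])
  (PySem.List.pyRange 1 (lists.length : Int) 1).foldl
    (fun groups nlist =>
      let groups_w_nlist := groups.filter (fun g => ((g.length : Int) == nlist))
      -- 'for i in range(len(groups_w_nlist)) … groups_w_nlist[i]' = fold over groups_w_nlist;
      -- 'for j in range(n_list) … lists[j]' = fold over lists (all indices in range)
      groups_w_nlist.foldl
        (fun groups g =>
          lists.foldl
            (fun groups l =>
              let new_group := g ++ [l]
              if if_separate_lists new_group except_nums == 1 then groups ++ [new_group]
              else groups)
            groups)
        groups)
    groups

-- ===== PORT B =====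
-- all indices produced by range(n) are in range, so Python's lists[i] / ok[j] / comp[i][j]
-- are ported exactly by getD with a default that is never used
def get_non_repetitive_groups_alt (lists : List (List Int)) (except_nums : List Int) : List (List (List Int)) :=
  let n := lists.length
  let filt := lists.map (fun l => l.filter (fun x => !except_nums.contains x))
  let ok := filt.map (fun f => ((PySem.Set.ofList f).length == f.length))
  let comp := (List.range n).map (fun i => (List.range n).map (fun j =>
      PySem.Set.isdisjoint (PySem.Set.ofList (filt.getD i [])) (filt.getD j [])))
  let frontier := ((List.range n).filter (fun i => ok.getD i false)).map (fun i => [i])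
  ((PySem.List.pyRange 1 (n : Int) 1).foldl
    (fun (st : List (List (List Int)) × List (List Nat)) _ =>
      let nxt := st.2.flatMap (fun g =>
        ((List.range n).filter (fun j => ok.getD j false &&
            g.all (fun i => ((comp.getD i []).getD j false)))).map (fun j => g ++ [j]))
      (st.1 ++ nxt.map (fun g => g.map (fun i => lists.getD i [])), nxt))
    (lists.map (fun l => [l]), frontier)).1

-- ===== PRECONDITION & SPEC =====
def Spec_get_non_repetitive_groups (lists : List (List Int)) (except_nums : List Int) (out : List (List (List Int))) : Prop := out = get_non_repetitive_groups_alt lists except_nums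
instance (lists : List (List Int)) (except_nums : List Int) (out : List (List (List Int))) : Decidable (Spec_get_non_repetitive_groups lists except_nums out) := by unfold Spec_get_non_repetitive_groups; infer_instance

-- ===== CLAIM (what is proved, stated in full; the proofs are below) =====
def Claim_equal_get_non_repetitive_groups : Prop := ∀ (lists : List (List Int)) (except_nums : List Int), Dom_get_non_repetitive_groups lists except_nums → Spec_get_non_repetitive_groups lists except_nums (get_non_repetitive_groups lists except_nums)

-- ===== LEMMAS AND PROOFS =====

-- the except-filtered content of one list; separateness of a group = the filtered flatten
-- has no duplicates; pvOk = separateness of a singleton group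
def pvFil (ex l : List Int) : List Int := l.filter (fun x => !ex.contains x)

def pv_sep (ex : List Int) (group : List (List Int)) : Bool :=
  ((PySem.Set.ofList (group.flatMap (pvFil ex))).length == (group.flatMap (pvFil ex)).length)

def pvOk (ex l : List Int) : Bool :=
  ((PySem.Set.ofList (pvFil ex l)).length == (pvFil ex l).length)

def pvToGroup (lists : List (List Int)) (g : List Nat) : List (List Int) :=
  g.map (fun i => lists.getD i [])

-- the one-round extension of a frontier of groups, with the flatten-based test
def pvNext (lists : List (List Int)) (ex : List Int) (fr : List (List (List Int))) :
    List (List (List Int)) :=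
  fr.flatMap (fun g => (lists.filter (fun l => pv_sep ex (g ++ [l]))).map (fun l => g ++ [l]))

lemma pv_sep_nodup_iff (xs : List Int) :
    ((PySem.Set.ofList xs).length == xs.length) = true ↔ xs.Nodup := by
  constructor
  · intro h
    have h0 : (PySem.Set.ofList xs).length = xs.length := by simpa using h
    have h2 : List.Perm (PySem.Set.ofList xs) xs.dedup := by
      apply List.perm_of_nodup_nodup_toFinset_eq (PySem.Set.nodup_ofList xs) (List.nodup_dedup xs)
      ext a
      simp [PySem.Set.mem_ofList]
    have h3 := h2.length_eq
    rw [h0] at h3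
    exact List.dedup_eq_self.mp (List.Sublist.eq_of_length (List.dedup_sublist xs) h3.symm)
  · intro h
    rw [PySem.Set.ofList_eq_self_of_nodup xs h]
    simp

-- A's "no shared non-excepted element" test is emptiness of the real_shared list;
-- it holds exactly when the non-excepted flattened elements are pairwise distinct
lemma shared_empty_iff (fl ex : List Int) :
    ((PySem.Set.ofList (fl.filter (fun x => decide (1 < fl.count x)))).filter (fun x => !ex.contains x)).length = 0
    ↔ (fl.filter (fun x => !ex.contains x)).Nodup := by
  rw [List.length_eq_zero_iff, List.filter_eq_nil_iff, List.nodup_iff_count_le_one]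
  constructor
  · intro h a
    by_cases ha : a ∈ ex
    · have hno : a ∉ fl.filter (fun x => !ex.contains x) := by
        simp [List.mem_filter, ha]
      rw [List.count_eq_zero.mpr hno]
      omega
    · rw [List.count_filter (by simpa using ha)]
      by_contra hgt
      have hmem : a ∈ fl := by
        rw [← List.count_pos_iff]; omega
      have hin : a ∈ PySem.Set.ofList (fl.filter (fun x => decide (1 < fl.count x))) := by
        rw [PySem.Set.mem_ofList, List.mem_filter]
        exact ⟨hmem, by simp; omega⟩
      have := h a hin
      simp [ha] at this
  · intro h a ha
    rw [PySem.Set.mem_ofList, List.mem_filter] at ha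
    obtain ⟨hmem, hc⟩ := ha
    simp only [Bool.not_eq_true]
    by_contra hnex
    have hcnt := h a
    rw [List.count_filter (by simpa using hnex)] at hcnt
    simp at hc
    omega

lemma flat_filter (g : List (List Int)) (ex : List Int) :
    g.flatMap (pvFil ex) = (g.flatMap (fun l => l)).filter (fun x => !ex.contains x) := by
  induction g with
  | nil => rfl
  | cons a g ih => rw [List.flatMap_cons, List.flatMap_cons, List.filter_append, ih]; rfl

-- A's count-based test agrees with the flatten-then-Nodup test
lemma sep_eq (ex : List Int) (g : List (List Int)) :
    (if_separate_lists g ex == 1) = pv_sep ex g := by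
  unfold if_separate_lists pv_sep
  rw [flat_filter]
  set fl := g.flatMap (fun l => l) with hfl
  by_cases hc : ((PySem.Set.ofList (fl.filter (fun x => decide (1 < fl.count x)))).filter
      (fun x => !ex.contains x)).length = 0
  · rw [if_pos hc]
    have hnd := (shared_empty_iff fl ex).mp hc
    have := (pv_sep_nodup_iff (fl.filter (fun x => !ex.contains x))).mpr hnd
    simp only [this]
    rfl
  · rw [if_neg hc]
    have hnd : ¬ (fl.filter (fun x => !ex.contains x)).Nodup :=
      fun hn => hc ((shared_empty_iff fl ex).mpr hn)
    have hb : ((PySem.Set.ofList (fl.filter (fun x => !ex.contains x))).length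
        == (fl.filter (fun x => !ex.contains x)).length) = false := by
      by_contra hbne
      exact hnd ((pv_sep_nodup_iff _).mp (Bool.not_eq_false _ ▸ Bool.of_not_eq_false hbne))
    simp only [hb]
    rfl

-- A's nested append loops over a fixed batch compute exactly groups ++ pvNext batch
lemma stepA_eq (lists : List (List Int)) (ex : List Int)
    (batch groups : List (List (List Int))) :
    batch.foldl
      (fun groups g =>
        lists.foldl
          (fun groups l =>
            if if_separate_lists (g ++ [l]) ex == 1 then groups ++ [g ++ [l]] else groups)
          groups)
      groups = groups ++ pvNext lists ex batch := by
  have hinner : ∀ (g : List (List Int)) (acc : List (List (List Int))),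
      lists.foldl
        (fun groups l =>
          if if_separate_lists (g ++ [l]) ex == 1 then groups ++ [g ++ [l]] else groups)
        acc
      = acc ++ (lists.filter (fun l => pv_sep ex (g ++ [l]))).map (fun l => g ++ [l]) := by
    intro g acc
    rw [← PySem.List.foldl_append_if (fun l => pv_sep ex (g ++ [l])) (fun l => g ++ [l]) lists acc]
    apply PySem.List.foldl_congr_mem
    intro acc' l _
    simp only [sep_eq]
  have hbody : (fun (groups : List (List (List Int))) (g : List (List Int)) =>
      lists.foldl
        (fun groups l =>
          if if_separate_lists (g ++ [l]) ex == 1 then groups ++ [g ++ [l]] else groups)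
        groups)
      = fun groups g =>
          groups ++ (lists.filter (fun l => pv_sep ex (g ++ [l]))).map (fun l => g ++ [l]) := by
    funext acc g
    exact hinner g acc
  rw [hbody]
  exact PySem.List.foldl_append_eq_flatMap _ batch groups

-- every group produced by one extension round has length a+1 when the frontier has length a
lemma mem_pvNext_length (lists : List (List Int)) (ex : List Int)
    (fr : List (List (List Int))) (a : Int)
    (hfr : ∀ g ∈ fr, (g.length : Int) = a) :
    ∀ g' ∈ pvNext lists ex fr, (g'.length : Int) = a + 1 := by
  intro g' hg'
  rw [pvNext, List.mem_flatMap] at hg'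
  obtain ⟨g, hg, hmap⟩ := hg'
  rw [List.mem_map] at hmap
  obtain ⟨l, _, rfl⟩ := hmap
  have := hfr g hg
  simp only [List.length_append, List.length_cons, List.length_nil]
  push_cast
  omega

-- the two loop bodies, named so the folds can be compared
def pvStepMid (lists : List (List Int)) (ex : List Int) :
    (List (List (List Int)) × List (List (List Int))) → Int →
      (List (List (List Int)) × List (List (List Int))) :=
  fun st _ => (st.1 ++ pvNext lists ex st.2, pvNext lists ex st.2)

def pvStepB (lists : List (List Int)) (ok : List Bool) (comp : List (List Bool)) :
    (List (List (List Int)) × List (List Nat)) → Int →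
      (List (List (List Int)) × List (List Nat)) :=
  fun st _ =>
    let nxt := st.2.flatMap (fun g =>
      ((List.range lists.length).filter (fun j => ok.getD j false &&
          g.all (fun i => ((comp.getD i []).getD j false)))).map (fun j => g ++ [j]))
    (st.1 ++ nxt.map (fun g => g.map (fun i => lists.getD i [])), nxt)

-- stage 1: A's growing list with the per-round length filter equals the explicit
-- (accumulated list, frontier-of-groups) fold with the flatten-based test
lemma loop_eq (lists : List (List Int)) (ex : List Int) :
    ∀ (m : Nat) (a : Int) (groups fr : List (List (List Int))),
      groups.filter (fun g => ((g.length : Int) == a)) = fr →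
      (∀ g ∈ groups, (g.length : Int) ≤ a) →
      (PySem.List.pyRange a (a + m) 1).foldl
        (fun groups nlist =>
          (groups.filter (fun g => ((g.length : Int) == nlist))).foldl
            (fun groups g =>
              lists.foldl
                (fun groups l =>
                  if if_separate_lists (g ++ [l]) ex == 1 then groups ++ [g ++ [l]]
                  else groups)
                groups)
            groups)
        groups
      = ((PySem.List.pyRange a (a + m) 1).foldl (pvStepMid lists ex) (groups, fr)).1 := by
  intro m
  induction m with
  | zero =>
    intro a groups fr _ _
    rw [show a + ((0 : Nat) : Int) = a by push_cast; ring]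
    rw [PySem.List.pyRange_one_eq_nil (le_refl a)]
    simp
  | succ m ih =>
    intro a groups fr hfilter hle
    have hlt : a < a + ((m + 1 : Nat) : Int) := by push_cast; omega
    rw [PySem.List.pyRange_one_cons hlt]
    simp only [List.foldl_cons]
    have hrange : PySem.List.pyRange (a + 1) (a + ((m + 1 : Nat) : Int)) 1
        = PySem.List.pyRange (a + 1) ((a + 1) + ((m : Nat) : Int)) 1 := by
      congr 1
      push_cast
      ring
    have hfr_len : ∀ g ∈ fr, (g.length : Int) = a := by
      intro g hg
      rw [← hfilter] at hg
      have := List.of_mem_filter hg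
      simpa using this
    have hnext_len := mem_pvNext_length lists ex fr a hfr_len
    rw [stepA_eq lists ex (groups.filter (fun g => ((g.length : Int) == a))) groups,
        hfilter, hrange]
    apply ih (a + 1) (groups ++ pvNext lists ex fr) (pvNext lists ex fr)
    · rw [List.filter_append]
      have h1 : groups.filter (fun g => ((g.length : Int) == a + 1)) = [] := by
        rw [List.filter_eq_nil_iff]
        intro g hg
        have := hle g hg
        simp only [beq_iff_eq]
        intro hcon
        omega
      have h2 : (pvNext lists ex fr).filter (fun g => ((g.length : Int) == a + 1))
          = pvNext lists ex fr := by
        rw [List.filter_eq_self]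
        intro g hg
        simp only [beq_iff_eq]
        exact hnext_len g hg
      rw [h1, h2, List.nil_append]
    · intro g hg
      rcases List.mem_append.mp hg with h | h
      · have := hle g h; omega
      · have := hnext_len g h; omega

-- ===== stage 2: the frontier-of-groups fold equals B's index-tuple/matrix fold =====

lemma getD_map_lt {α β : Type} (xs : List α) (f : α → β) (d : β) (d' : α) {i : Nat}
    (h : i < xs.length) : (xs.map f).getD i d = f (xs.getD i d') := by
  rw [List.getD_eq_getElem _ _ (by simpa using h), List.getD_eq_getElem _ _ h, List.getElem_map]

lemma getD_range_lt {n i : Nat} (h : i < n) : (List.range n).getD i 0 = i := by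
  rw [List.getD_eq_getElem _ _ (by simpa using h)]; simp

-- iterating a list by range(len(...)) indices is iterating the list itself
lemma range_filter_map_eq {α β : Type} (xs : List α) (d : α) (P : α → Bool) (F : α → β) :
    ((List.range xs.length).filter (fun j => P (xs.getD j d))).map (fun j => F (xs.getD j d))
      = (xs.filter P).map F := by
  induction xs with
  | nil => rfl
  | cons x t ih =>
    simp only [List.length_cons, List.range_succ_eq_map, List.filter_cons, List.getD_cons_zero,
      List.filter_map, Function.comp_def, List.getD_cons_succ]
    by_cases hpx : P x
    · simp only [hpx, if_true, List.map_cons, List.map_map, Function.comp_def,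
        List.getD_cons_succ, List.getD_cons_zero, ih]
    · simp only [hpx, Bool.false_eq_true, if_false, List.map_map, Function.comp_def,
        List.getD_cons_succ, ih]

lemma pv_sep_singleton (ex l : List Int) : pv_sep ex [l] = pvOk ex l := by
  simp [pv_sep, pvOk]

-- separateness of an extended group splits into: base separate, new list self-separate,
-- and the new list disjoint from every member of the base
lemma pv_sep_append (ex : List Int) (G : List (List Int)) (l : List Int)
    (hG : pv_sep ex G = true) :
    pv_sep ex (G ++ [l])
      = (pvOk ex l && G.all (fun m =>
          PySem.Set.isdisjoint (PySem.Set.ofList (pvFil ex m)) (pvFil ex l))) := by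
  have hGn : (G.flatMap (pvFil ex)).Nodup := (pv_sep_nodup_iff _).mp hG
  apply Bool.coe_iff_coe.mp
  rw [pv_sep, pv_sep_nodup_iff]
  simp only [List.flatMap_append, List.flatMap_cons, List.flatMap_nil, List.append_nil]
  rw [List.nodup_append']
  constructor
  · rintro ⟨-, hl, hdisj⟩
    rw [Bool.and_eq_true]
    refine ⟨(pv_sep_nodup_iff _).mpr hl, ?_⟩
    rw [List.all_eq_true]
    intro m hm
    rw [PySem.Set.isdisjoint_iff]
    intro x hx hxl
    rw [PySem.Set.mem_ofList] at hx
    exact hdisj (List.mem_flatMap.mpr ⟨m, hm, hx⟩) hxl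
  · intro h
    rw [Bool.and_eq_true, List.all_eq_true] at h
    obtain ⟨hok, hall⟩ := h
    refine ⟨hGn, (pv_sep_nodup_iff _).mp hok, ?_⟩
    intro x hx hxl
    obtain ⟨m, hm, hxm⟩ := List.mem_flatMap.mp hx
    have hxs : x ∈ PySem.Set.ofList (pvFil ex m) := by rw [PySem.Set.mem_ofList]; exact hxm
    exact (PySem.Set.isdisjoint_iff _ _).mp (hall m hm) x hxs hxl

lemma pv_sep_of_append (ex : List Int) (G : List (List Int)) (l : List Int)
    (h : pv_sep ex (G ++ [l]) = true) : pv_sep ex G = true := by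
  rw [pv_sep, pv_sep_nodup_iff] at h ⊢
  rw [List.flatMap_append] at h
  exact h.of_append_left

-- groups in a frontier that are not separate produce no extensions
lemma pvNext_filter_sep (lists : List (List Int)) (ex : List Int)
    (fr : List (List (List Int))) :
    pvNext lists ex fr = pvNext lists ex (fr.filter (pv_sep ex)) := by
  induction fr with
  | nil => rfl
  | cons g fr ih =>
    rw [pvNext, List.flatMap_cons, List.filter_cons]
    by_cases hg : pv_sep ex g = true
    · rw [if_pos hg, pvNext, List.flatMap_cons]
      rw [pvNext] at ih
      rw [ih]
      rfl
    · have hempty : lists.filter (fun l => pv_sep ex (g ++ [l])) = [] := by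
        rw [List.filter_eq_nil_iff]
        intro l _ hc
        exact hg (pv_sep_of_append ex g l hc)
      rw [if_neg hg, hempty]
      rw [pvNext] at ih
      simpa using ih

-- every produced extension is itself separate
lemma mem_pvNext_sep (lists : List (List Int)) (ex : List Int)
    (fr : List (List (List Int))) :
    ∀ g' ∈ pvNext lists ex fr, pv_sep ex g' = true := by
  intro g' hg'
  rw [pvNext, List.mem_flatMap] at hg'
  obtain ⟨g, _, hmap⟩ := hg'
  rw [List.mem_map] at hmap
  obtain ⟨l, hl, rfl⟩ := hmap
  exact (List.mem_filter.mp hl).2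

lemma pvToGroup_append (lists : List (List Int)) (g : List Nat) (j : Nat) :
    pvToGroup lists (g ++ [j]) = pvToGroup lists g ++ [lists.getD j []] := by
  simp [pvToGroup]

lemma all_congr_mem' {α : Type} (l : List α) (f g : α → Bool) (h : ∀ a ∈ l, f a = g a) :
    l.all f = l.all g := by
  induction l with
  | nil => rfl
  | cons x t ih =>
    simp only [List.all_cons, h x (by simp), ih (fun a ha => h a (by simp [ha]))]

-- one extension round of a frontier of valid index tuples, decoded, is pvNext of the decoded frontier
lemma pvNext_toGroup (lists : List (List Int)) (ex : List Int)
    (ok : List Bool) (comp : List (List Bool))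
    (hok : ∀ j, j < lists.length → ok.getD j false = pvOk ex (lists.getD j []))
    (hcomp : ∀ i j, i < lists.length → j < lists.length →
        (comp.getD i []).getD j false
          = PySem.Set.isdisjoint (PySem.Set.ofList (pvFil ex (lists.getD i [])))
              (pvFil ex (lists.getD j [])))
    (frI : List (List Nat))
    (hidx : ∀ g ∈ frI, ∀ i ∈ g, i < lists.length)
    (hsep : ∀ g ∈ frI, pv_sep ex (pvToGroup lists g) = true) :
    pvNext lists ex (frI.map (pvToGroup lists))
      = (frI.flatMap (fun g =>
          ((List.range lists.length).filter (fun j => ok.getD j false &&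
              g.all (fun i => ((comp.getD i []).getD j false)))).map (fun j => g ++ [j]))).map
          (pvToGroup lists) := by
  rw [pvNext, List.flatMap_map, List.map_flatMap]
  apply List.flatMap_congr
  intro g hg
  simp only [List.map_map]
  have htest : (List.range lists.length).filter (fun j => ok.getD j false &&
        g.all (fun i => ((comp.getD i []).getD j false)))
      = (List.range lists.length).filter
          (fun j => pv_sep ex (pvToGroup lists g ++ [lists.getD j []])) := by
    apply List.filter_congr
    intro j hj
    have hjn : j < lists.length := List.mem_range.mp hj
    rw [hok j hjn]
    have hall : g.all (fun i => ((comp.getD i []).getD j false))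
        = g.all (fun i => PySem.Set.isdisjoint (PySem.Set.ofList (pvFil ex (lists.getD i [])))
            (pvFil ex (lists.getD j []))) := by
      apply all_congr_mem'
      intro i hi
      exact hcomp i j (hidx g hg i hi) hjn
    rw [hall, pv_sep_append ex (pvToGroup lists g) (lists.getD j []) (hsep g hg)]
    rw [pvToGroup, List.all_map]
    rfl
  rw [htest]
  have hmapped : (List.map (pvToGroup lists ∘ fun j => g ++ [j])
        ((List.range lists.length).filter
          (fun j => pv_sep ex (pvToGroup lists g ++ [lists.getD j []]))))
      = ((List.range lists.length).filter
          (fun j => pv_sep ex (pvToGroup lists g ++ [lists.getD j []]))).map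
          (fun j => pvToGroup lists g ++ [lists.getD j []]) := by
    apply List.map_congr_left
    intro j _
    simp only [Function.comp_apply, pvToGroup_append]
  rw [hmapped]
  exact (range_filter_map_eq lists [] (fun l => pv_sep ex (pvToGroup lists g ++ [l]))
    (fun l => pvToGroup lists g ++ [l])).symm

-- stage 2 main invariant: the frontier-of-groups fold equals B's index-tuple/matrix fold
lemma loop2 (lists : List (List Int)) (ex : List Int)
    (ok : List Bool) (comp : List (List Bool))
    (hok : ∀ j, j < lists.length → ok.getD j false = pvOk ex (lists.getD j []))
    (hcomp : ∀ i j, i < lists.length → j < lists.length →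
        (comp.getD i []).getD j false
          = PySem.Set.isdisjoint (PySem.Set.ofList (pvFil ex (lists.getD i [])))
              (pvFil ex (lists.getD j []))) :
    ∀ (r : List Int) (acc fr : List (List (List Int))) (frI : List (List Nat)),
      fr.filter (pv_sep ex) = frI.map (pvToGroup lists) →
      (∀ g ∈ frI, ∀ i ∈ g, i < lists.length) →
      (r.foldl (pvStepMid lists ex) (acc, fr)).1
        = (r.foldl (pvStepB lists ok comp) (acc, frI)).1 := by
  intro r
  induction r with
  | nil =>
    intro acc fr frI _ _
    rfl
  | cons e r ih =>
    intro acc fr frI hinv hidx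
    have hsep : ∀ g ∈ frI, pv_sep ex (pvToGroup lists g) = true := by
      intro g hg
      have hmem : pvToGroup lists g ∈ fr.filter (pv_sep ex) := by
        rw [hinv]
        exact List.mem_map_of_mem hg
      exact (List.mem_filter.mp hmem).2
    have hnext : pvNext lists ex fr
        = (frI.flatMap (fun g =>
            ((List.range lists.length).filter (fun j => ok.getD j false &&
                g.all (fun i => ((comp.getD i []).getD j false)))).map (fun j => g ++ [j]))).map
            (fun g => g.map (fun i => lists.getD i [])) := by
      rw [pvNext_filter_sep, hinv,
        pvNext_toGroup lists ex ok comp hok hcomp frI hidx hsep]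
      rfl
    have hsepnew : (pvNext lists ex fr).filter (pv_sep ex) = pvNext lists ex fr :=
      List.filter_eq_self.mpr (fun g hg => mem_pvNext_sep lists ex fr g hg)
    have hidxnew : ∀ g ∈ frI.flatMap (fun g =>
        ((List.range lists.length).filter (fun j => ok.getD j false &&
            g.all (fun i => ((comp.getD i []).getD j false)))).map (fun j => g ++ [j])),
        ∀ i ∈ g, i < lists.length := by
      intro g' hg' i hi
      obtain ⟨g, hg, hmap⟩ := List.mem_flatMap.mp hg'
      obtain ⟨j, hj, rfl⟩ := List.mem_map.mp hmap
      rcases List.mem_append.mp hi with h | h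
      · exact hidx g hg i h
      · have : i = j := by simpa using h
        subst this
        exact List.mem_range.mp (List.mem_filter.mp hj).1
    have hMid : (e :: r).foldl (pvStepMid lists ex) (acc, fr)
        = r.foldl (pvStepMid lists ex) (acc ++ pvNext lists ex fr, pvNext lists ex fr) := rfl
    have hB : (e :: r).foldl (pvStepB lists ok comp) (acc, frI)
        = r.foldl (pvStepB lists ok comp)
            (acc ++ (frI.flatMap (fun g =>
              ((List.range lists.length).filter (fun j => ok.getD j false &&
                  g.all (fun i => ((comp.getD i []).getD j false)))).map (fun j => g ++ [j]))).map
              (fun g => g.map (fun i => lists.getD i [])),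
             frI.flatMap (fun g =>
              ((List.range lists.length).filter (fun j => ok.getD j false &&
                  g.all (fun i => ((comp.getD i []).getD j false)))).map (fun j => g ++ [j]))) := rfl
    rw [hMid, hB, ← hnext]
    exact ih (acc ++ pvNext lists ex fr) (pvNext lists ex fr) _
      (by
        rw [hsepnew, hnext]
        apply List.map_congr_left
        intro g _
        rfl)
      hidxnew

-- ===== VERDICT (by name: the statement is the Claim_ definition above) =====
theorem get_non_repetitive_groups_spec : Claim_equal_get_non_repetitive_groups := by
  intro lists ex _
  unfold Spec_get_non_repetitive_groups
  by_cases hn : lists.length = 0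
  · have hnil : lists = [] := List.length_eq_zero_iff.mp hn
    subst hnil
    rfl
  · have hfil : (lists.map (fun l => l.filter (fun x => !ex.contains x)))
        = lists.map (pvFil ex) := rfl
    have hok : ∀ j, j < lists.length →
        ((lists.map (fun l => l.filter (fun x => !ex.contains x))).map
          (fun f => ((PySem.Set.ofList f).length == f.length))).getD j false
          = pvOk ex (lists.getD j []) := by
      intro j hj
      rw [getD_map_lt _ _ _ [] (by simpa using hj), getD_map_lt _ _ _ [] hj]
      rfl
    have hcomp : ∀ i j, i < lists.length → j < lists.length →
        (((List.range lists.length).map (fun i => (List.range lists.length).map (fun j =>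
            PySem.Set.isdisjoint
              (PySem.Set.ofList ((lists.map (fun l => l.filter (fun x => !ex.contains x))).getD i []))
              ((lists.map (fun l => l.filter (fun x => !ex.contains x))).getD j [])))).getD i []).getD j false
          = PySem.Set.isdisjoint (PySem.Set.ofList (pvFil ex (lists.getD i [])))
              (pvFil ex (lists.getD j [])) := by
      intro i j hi hj
      rw [getD_map_lt _ _ _ 0 (by simpa using hi), getD_range_lt hi,
          getD_map_lt _ _ _ 0 (by simpa using hj), getD_range_lt hj,
          getD_map_lt _ _ _ [] hi, getD_map_lt _ _ _ [] hj]
      rfl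
    -- initial frontier correspondence
    have hinv : (lists.map (fun l => [l])).filter (pv_sep ex)
        = (((List.range lists.length).filter (fun i =>
            ((lists.map (fun l => l.filter (fun x => !ex.contains x))).map
              (fun f => ((PySem.Set.ofList f).length == f.length))).getD i false)).map
            (fun i => [i])).map (pvToGroup lists) := by
      rw [List.map_map]
      have h1 : (List.map (pvToGroup lists ∘ fun i => [i])
            ((List.range lists.length).filter (fun i =>
              ((lists.map (fun l => l.filter (fun x => !ex.contains x))).map
                (fun f => ((PySem.Set.ofList f).length == f.length))).getD i false)))
          = ((List.range lists.length).filter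
              (fun i => pv_sep ex [lists.getD i []])).map (fun i => [lists.getD i []]) := by
        have hfc : (List.range lists.length).filter (fun i =>
              ((lists.map (fun l => l.filter (fun x => !ex.contains x))).map
                (fun f => ((PySem.Set.ofList f).length == f.length))).getD i false)
            = (List.range lists.length).filter (fun i => pv_sep ex [lists.getD i []]) := by
          apply List.filter_congr
          intro i hi
          rw [hok i (List.mem_range.mp hi), pv_sep_singleton]
        rw [hfc]
        apply List.map_congr_left
        intro i _
        rfl
      rw [h1,
        range_filter_map_eq lists [] (fun l => pv_sep ex [l]) (fun l => [l]),
        List.filter_map]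
      rfl
    have hidx : ∀ g ∈ ((List.range lists.length).filter (fun i =>
          ((lists.map (fun l => l.filter (fun x => !ex.contains x))).map
            (fun f => ((PySem.Set.ofList f).length == f.length))).getD i false)).map
          (fun i => [i]), ∀ i ∈ g, i < lists.length := by
      intro g hg i hi
      obtain ⟨j, hj, rfl⟩ := List.mem_map.mp hg
      have : i = j := by simpa using hi
      subst this
      exact List.mem_range.mp (List.mem_filter.mp hj).1
    -- A's loop = the frontier-of-groups fold
    have h1 : (1 : Int) + ((lists.length - 1 : Nat) : Int) = (lists.length : Int) := by
      have : 1 ≤ lists.length := Nat.one_le_iff_ne_zero.mpr hn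
      push_cast [this]
      ring
    have hA : get_non_repetitive_groups lists ex
        = ((PySem.List.pyRange 1 (lists.length : Int) 1).foldl (pvStepMid lists ex)
            (lists.map (fun l => [l]), lists.map (fun l => [l]))).1 := by
      unfold get_non_repetitive_groups
      rw [← h1]
      apply loop_eq lists ex (lists.length - 1) 1
      · rw [List.filter_eq_self]
        intro g hg
        obtain ⟨l, _, rfl⟩ := List.mem_map.mp hg
        simp
      · intro g hg
        obtain ⟨l, _, rfl⟩ := List.mem_map.mp hg
        simp
    have hB : get_non_repetitive_groups_alt lists ex
        = ((PySem.List.pyRange 1 (lists.length : Int) 1).foldl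
            (pvStepB lists
              ((lists.map (fun l => l.filter (fun x => !ex.contains x))).map
                (fun f => ((PySem.Set.ofList f).length == f.length)))
              ((List.range lists.length).map (fun i => (List.range lists.length).map (fun j =>
                PySem.Set.isdisjoint
                  (PySem.Set.ofList ((lists.map (fun l => l.filter (fun x => !ex.contains x))).getD i []))
                  ((lists.map (fun l => l.filter (fun x => !ex.contains x))).getD j [])))))
            (lists.map (fun l => [l]),
             ((List.range lists.length).filter (fun i =>
                ((lists.map (fun l => l.filter (fun x => !ex.contains x))).map
                  (fun f => ((PySem.Set.ofList f).length == f.length))).getD i false)).map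
                (fun i => [i]))).1 := rfl
    rw [hA, hB]
    exact loop2 lists ex _ _ hok hcomp (PySem.List.pyRange 1 (lists.length : Int) 1)
      (lists.map (fun l => [l])) (lists.map (fun l => [l])) _ hinv hidx
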